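-- pv_equiv track=rewrite | github.com/hamzahsiraj/A-complete-ETL-process | Standardization/Skyline_Capstone.py | letsTrim
-- ===== SOURCE A (Python) =====
-- def hasNumbers(inputString):
--     return any(char.isdigit() for char in inputString)
--
-- def letsTrim(address):
--     word = ' '
--     counter = 0;
--     if not hasNumbers(address):
--         return address
--     for v in address:
--         if v.isdigit():
--               word +=v
--         else:
--             if counter == 0:
--                 continue
--             else:
--                 word +=v
--         counter+=1
--     if not word:
--         return 'null'
--
--     return word
-- ===== SOURCE B (Python) =====
-- def letsTrim(address):
--     for i, ch in enumerate(address):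
--         if ch.isdigit():
--             return ' ' + address[i:]
--     return address
-- ===== Notes on version B (the rewrite author's own statement) =====
-- stated objective: simpler
-- what changed: Replaces the per-character accumulate-with-counter state machine (plus a separate hasNumbers pre-scan) with locate-then-slice: find the first digit's index and return a single-space prefix plus the slice of address from that index, or address unchanged if there is no digit.
import Mathlib
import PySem

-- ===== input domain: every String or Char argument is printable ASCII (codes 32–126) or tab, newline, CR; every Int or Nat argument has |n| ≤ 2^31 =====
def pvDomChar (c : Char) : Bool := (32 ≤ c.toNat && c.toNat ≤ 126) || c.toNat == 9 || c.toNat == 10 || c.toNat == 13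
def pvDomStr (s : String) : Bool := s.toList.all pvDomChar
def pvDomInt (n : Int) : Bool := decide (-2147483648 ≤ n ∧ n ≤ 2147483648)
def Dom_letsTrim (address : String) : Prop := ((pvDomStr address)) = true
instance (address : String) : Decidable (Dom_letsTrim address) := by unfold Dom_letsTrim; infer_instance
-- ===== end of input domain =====

-- B replaces A's accumulate-with-counter state machine by locate-the-first-digit-then-slice (simpler decomposition, same cost).

-- ===== PORT A =====
def hasNumbers (inputString : String) : Bool :=
  inputString.toList.any PySem.Chars.isdigit

def letsTrimStep (p : List Char × Nat) (v : Char) : List Char × Nat :=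
  if PySem.Chars.isdigit v then (p.1 ++ [v], p.2 + 1)
  else if p.2 == 0 then p
  else (p.1 ++ [v], p.2 + 1)

def letsTrim (address : String) : String :=
  if !hasNumbers address then address
  else
    let st := address.toList.foldl letsTrimStep ([' '], 0)
    if st.1.isEmpty then "null"
    else String.ofList st.1

-- ===== PORT B =====
def letsTrim_alt (address : String) : String :=
  match address.toList.findIdx? PySem.Chars.isdigit with
  | some i => String.ofList (' ' :: address.toList.drop i)   -- ' ' + address[i:]
  | none => address

-- ===== PRECONDITION & SPEC =====
def Spec_letsTrim (address : String) (out : String) : Prop := out = letsTrim_alt address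
instance (address : String) (out : String) : Decidable (Spec_letsTrim address out) := by unfold Spec_letsTrim; infer_instance

-- ===== CLAIM (what is proved, stated in full; the proofs are below) =====
def Claim_equal_letsTrim : Prop := ∀ (address : String), Dom_letsTrim address → Spec_letsTrim address (letsTrim address)

-- ===== LEMMAS AND PROOFS =====

-- once the counter is positive, the loop appends every remaining character
theorem letsTrim_loop_pos (cs : List Char) :
    ∀ (w : List Char) (c : Nat), (cs.foldl letsTrimStep (w, c + 1)).1 = w ++ cs := by
  induction cs with
  | nil => intro w c; simp
  | cons v cs ih =>
    intro w c
    have hstep : letsTrimStep (w, c + 1) v = (w ++ [v], c + 2) := by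
      unfold letsTrimStep; split_ifs <;> simp_all
    simp [List.foldl_cons, hstep, ih]

-- from counter 0, when a digit exists, the loop yields w ++ the suffix from the first digit
theorem letsTrim_loop_zero (cs : List Char) :
    ∀ (w : List Char), cs.any PySem.Chars.isdigit = true →
      (cs.foldl letsTrimStep (w, 0)).1 = w ++ cs.dropWhile (fun c => !PySem.Chars.isdigit c) := by
  induction cs with
  | nil => intro w h; simp at h
  | cons v cs ih =>
    intro w h
    by_cases hd : PySem.Chars.isdigit v
    · have hstep : letsTrimStep (w, 0) v = (w ++ [v], 1) := by
        unfold letsTrimStep; simp [hd]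
      simp [List.foldl_cons, hstep, letsTrim_loop_pos cs (w ++ [v]) 0, hd]
    · have hstep : letsTrimStep (w, 0) v = (w, 0) := by
        unfold letsTrimStep; simp [hd]
      have hany : cs.any PySem.Chars.isdigit = true := by
        simp [List.any_cons, hd] at h
        exact List.any_eq_true.mpr h
      simp [List.foldl_cons, hstep, ih w hany, hd]

-- findIdx?-then-drop equals dropWhile
theorem findIdx?_drop (cs : List Char) :
    ∀ i, cs.findIdx? PySem.Chars.isdigit = some i →
      cs.drop i = cs.dropWhile (fun c => !PySem.Chars.isdigit c) := by
  induction cs with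
  | nil => intro i h; simp at h
  | cons v cs ih =>
    intro i h
    by_cases hd : PySem.Chars.isdigit v
    · simp [List.findIdx?_cons, hd] at h
      simp [← h, hd]
    · simp [List.findIdx?_cons, hd] at h
      obtain ⟨j, hj, hji⟩ := h
      simp [← hji, hd, ih j hj]

theorem letsTrim_spec : Claim_equal_letsTrim := by
  unfold Claim_equal_letsTrim Spec_letsTrim
  intro address _
  unfold letsTrim letsTrim_alt hasNumbers
  by_cases hany : address.toList.any PySem.Chars.isdigit
  · have hsome : (address.toList.findIdx? PySem.Chars.isdigit).isSome := by
      rw [List.findIdx?_isSome]; exact hany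
    obtain ⟨i, hi⟩ := Option.isSome_iff_exists.mp hsome
    have hdrop := findIdx?_drop address.toList i hi
    have hloop := letsTrim_loop_zero address.toList [' '] hany
    simp [hany, hi, hloop, ← hdrop]
  · have hnone : address.toList.findIdx? PySem.Chars.isdigit = none := by
      have : (address.toList.findIdx? PySem.Chars.isdigit).isSome = false := by
        rw [List.findIdx?_isSome]; simpa using hany
      simpa [Option.isSome_eq_false_iff, Option.isNone_iff_eq_none] using this
    simp [hany, hnone]
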